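-- pv_equiv track=rewrite | github.com/MartinRuini/AdventOfCode2019 | 4/4b.py | check_doubles
-- ===== SOURCE A (Python) =====
-- def check_doubles(value):
--     tmp = ""
--     count = 0
--     for digit in value:
--         if tmp != digit:
--             tmp = digit
--             if count == 1:
--                 return True
--             else:
--                 count = 0
--         else:
--             count = count + 1
--     if count == 1:
--         return True
--     else:
--         return False
-- ===== SOURCE B (Python) =====
-- def _runs(value):
--     # run-length encode consecutive equal characters
--     res = []
--     i = 0
--     n = len(value)
--     while i < n:
--         j = i
--         while j < n and value[j] == value[i]:
--             j += 1
--         res.append((value[i], j - i))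
--         i = j
--     return res
--
-- def check_doubles(value):
--     return any(cnt == 2 for _, cnt in _runs(value))
-- ===== Notes on version B (the rewrite author's own statement) =====
-- stated objective: simpler
-- what changed: B separates the work into two phases: a run-length encoding of consecutive equal characters, then a check that some run has length exactly 2, replacing A's fused single loop with early return and the sentinel tmp/count state.
import Mathlib
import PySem

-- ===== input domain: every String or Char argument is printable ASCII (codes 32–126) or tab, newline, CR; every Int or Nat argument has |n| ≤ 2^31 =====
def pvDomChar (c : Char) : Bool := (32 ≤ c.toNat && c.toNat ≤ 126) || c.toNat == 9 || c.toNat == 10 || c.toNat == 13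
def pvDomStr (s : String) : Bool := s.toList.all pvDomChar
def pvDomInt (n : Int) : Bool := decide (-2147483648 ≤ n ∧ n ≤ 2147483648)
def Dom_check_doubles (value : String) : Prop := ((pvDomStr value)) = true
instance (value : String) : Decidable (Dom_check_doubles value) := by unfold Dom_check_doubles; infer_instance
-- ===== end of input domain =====

-- B changes: a two-phase decomposition (run-length encode, then test for a run of length 2)
-- instead of A's fused single loop with sentinel tmp and early return; objective: simpler.

-- ===== PORT A =====
-- A's loop: tmp starts as "" (never equal to a 1-char digit), modelled as Option Char = none;
-- the early `return True` is the `true` branch; after the loop, `count == 1` is returned.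
def check_doubles_loop : List Char → Option Char → Nat → Bool
  | [], _, count => count == 1
  | digit :: rest, tmp, count =>
    if tmp != some digit then
      if count == 1 then true else check_doubles_loop rest (some digit) 0
    else
      check_doubles_loop rest tmp (count + 1)

def check_doubles (value : String) : Bool :=
  check_doubles_loop value.toList none 0

-- ===== PORT B =====
-- run-length encoding of consecutive equal characters (Source B's _runs: inner while = takeWhile/dropWhile)
def runsOf : List Char → List (Char × Nat)
  | [] => []
  | c :: cs =>
    (c, (cs.takeWhile (· == c)).length + 1) :: runsOf (cs.dropWhile (· == c))
  termination_by cs => cs.length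
  decreasing_by
    have := List.length_dropWhile_le (· == c) cs
    simp only [List.length_cons]; omega

def check_doubles_alt (value : String) : Bool :=
  (runsOf value.toList).any (fun p => p.2 == 2)

-- ===== PRECONDITION & SPEC =====
def Spec_check_doubles (value : String) (out : Bool) : Prop := out = check_doubles_alt value
instance (value : String) (out : Bool) : Decidable (Spec_check_doubles value out) := by unfold Spec_check_doubles; infer_instance

-- ===== CLAIM (what is proved, stated in full; the proofs are below) =====
def Claim_equal_check_doubles : Prop := ∀ (value : String), Dom_check_doubles value → Spec_check_doubles value (check_doubles value)

-- ===== LEMMAS AND PROOFS =====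

-- A's loop, once inside the run of character c with accumulated count, consumes the rest of
-- that run (takeWhile) and then either returns at the boundary or restarts on the next run.
theorem check_doubles_loop_run (cs : List Char) : ∀ (c : Char) (count : Nat),
    check_doubles_loop cs (some c) count =
      match cs.dropWhile (· == c) with
      | [] => (count + (cs.takeWhile (· == c)).length) == 1
      | d :: rest =>
          if (count + (cs.takeWhile (· == c)).length) == 1 then true
          else check_doubles_loop rest (some d) 0 := by
  induction cs with
  | nil => intro c count; simp [check_doubles_loop]
  | cons x xs ih =>
    intro c count
    by_cases hx : x = c
    · subst hx
      simp only [List.takeWhile_cons, List.dropWhile_cons, beq_self_eq_true]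
      have : check_doubles_loop (x :: xs) (some x) count
          = check_doubles_loop xs (some x) (count + 1) := by
        simp [check_doubles_loop]
      rw [this, ih x (count + 1)]
      simp [Nat.add_assoc, Nat.add_comm 1]
    · have hxc : ¬ c = x := fun h => hx h.symm
      have hbeq : (x == c) = false := by simp [hx]
      simp only [List.takeWhile_cons, List.dropWhile_cons, hbeq]
      have : check_doubles_loop (x :: xs) (some c) count
          = if count == 1 then true else check_doubles_loop xs (some x) 0 := by
        simp [check_doubles_loop, hxc]
      rw [this]
      simp

-- starting a fresh run of c with count 0 computes exactly B's "some run has length 2" test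
theorem loop_eq_alt (cs : List Char) : ∀ (c : Char),
    check_doubles_loop cs (some c) 0 =
      (runsOf (c :: cs)).any (fun p => p.2 == 2) := by
  induction hn : cs.length using Nat.strong_induction_on generalizing cs with
  | _ n ih =>
    intro c
    rw [check_doubles_loop_run, runsOf]
    simp only [List.any_cons]
    cases hdw : cs.dropWhile (· == c) with
    | nil =>
      dsimp only
      simp [runsOf]
    | cons d rest =>
      have hlen : rest.length < n := by
        have h1 : (cs.dropWhile (· == c)).length ≤ cs.length :=
          cs.length_dropWhile_le _
        rw [hdw] at h1
        simp only [List.length_cons] at h1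
        omega
      dsimp only
      rw [ih rest.length hlen rest rfl d]
      by_cases h : (cs.takeWhile (· == c)).length = 1
      · simp [h]
      · have h2 : ((0 + (cs.takeWhile (· == c)).length) == 1) = false := by
          simp; omega
        have h3 : (((cs.takeWhile (· == c)).length + 1) == 2) = false := by
          simp; omega
        rw [h2, h3]
        simp

-- ===== VERDICT (by name: the statement is the Claim_ definition above) =====
theorem check_doubles_spec : Claim_equal_check_doubles := by
  intro value _
  show check_doubles value = check_doubles_alt value
  unfold check_doubles check_doubles_alt
  cases h : value.toList with
  | nil => simp [check_doubles_loop, runsOf]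
  | cons c cs =>
    have : check_doubles_loop (c :: cs) none 0 = check_doubles_loop cs (some c) 0 := by
      simp [check_doubles_loop]
    rw [this, loop_eq_alt]
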